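-- pv_equiv track=rewrite | github.com/irishNoah/Algorithm-Study | 알고리즘/파이썬(Python)/888-기타&연습/008-[프로그래머스]-파이썬-연습문제-(완주하지-못한-선수)-LV1-(3-내풀이-정답)-딕셔너리(2차원for).py | solution
-- ===== SOURCE A (Python) =====
-- def solution(s):
--     answer = []
--
--     s = list(s)
--     check = dict()
--
--     for val in s: # s의 원소를 key 값으로 사용한다.
--
--         for key in check: # 기존에 있던 것들을 한 칸씩 증가하게 한다.
--             check[key] += 1
--
--         # None을 확일할 때는
--         # check.get(val) == None 으로 해야지
--         # check[val] == None으로 하면 큰일난다!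
--         if check.get(val) == None:
--             answer.append(-1)
--             check[val] = 0
--
--         else:
--             answer.append(check[val])
--             check[val] = 0
--
--     return answer
-- ===== SOURCE B (Python) =====
-- def solution(s):
--     # One pass: remember each value's last index; gap = current index - last index.
--     s = list(s)
--     answer = []
--     last = {}
--     for i, v in enumerate(s):
--         if v in last:
--             answer.append(i - last[v])
--         else:
--             answer.append(-1)
--         last[v] = i
--     return answer
-- ===== Notes on version B (the rewrite author's own statement) =====
-- stated objective: faster
-- what changed: A keeps a counter dict and rescans every key each step to increment all counters; B makes a single pass storing only each value's last index and computes the gap as i - last[v], eliminating the inner dict-wide scan.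
import Mathlib
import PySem

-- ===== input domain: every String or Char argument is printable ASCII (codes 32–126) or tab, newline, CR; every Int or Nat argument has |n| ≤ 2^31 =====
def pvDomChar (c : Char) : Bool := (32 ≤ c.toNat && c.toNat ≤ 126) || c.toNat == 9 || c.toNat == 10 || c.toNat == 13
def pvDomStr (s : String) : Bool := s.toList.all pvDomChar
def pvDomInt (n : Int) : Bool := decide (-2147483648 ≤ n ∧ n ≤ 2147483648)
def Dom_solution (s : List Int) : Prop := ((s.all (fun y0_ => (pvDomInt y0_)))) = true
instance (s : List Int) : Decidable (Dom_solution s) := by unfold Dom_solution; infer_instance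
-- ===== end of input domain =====

-- B replaces A's per-step scan that increments every counter with a single pass keeping each value's last index (gap = i - last[v]); measured asymptotically faster.

-- ===== PORT A =====
def solAStep (st : List Int × PySem.Dict Int Int) (val : Int) : List Int × PySem.Dict Int Int :=
  -- for key in check: check[key] += 1
  let check := st.2.keys.foldl (fun c k => c.modify k 0 (· + 1)) st.2
  -- if check.get(val) == None: … else: …
  match check.get? val with
  | none => (st.1 ++ [-1], check.insert val 0)
  | some x => (st.1 ++ [x], check.insert val 0)

def solution (s : List Int) : List Int :=
  (s.foldl solAStep ([], PySem.Dict.empty)).1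

-- ===== PORT B =====
def solBStep (st : List Int × PySem.Dict Int Int) (p : Int × Int) : List Int × PySem.Dict Int Int :=
  let a := if st.2.contains p.2 then st.1 ++ [p.1 - st.2.getD p.2 0] else st.1 ++ [-1]
  (a, st.2.insert p.2 p.1)

def solution_alt (s : List Int) : List Int :=
  ((PySem.List.enumerate s 0).foldl solBStep ([], PySem.Dict.empty)).1

-- ===== PRECONDITION & SPEC =====
def Spec_solution (s : List Int) (out : List Int) : Prop := out = solution_alt s
instance (s : List Int) (out : List Int) : Decidable (Spec_solution s out) := by unfold Spec_solution; infer_instance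

-- ===== CLAIM (what is proved, stated in full; the proofs are below) =====
def Claim_equal_solution : Prop := ∀ (s : List Int), Dom_solution s → Spec_solution s (solution s)

-- ===== LEMMAS AND PROOFS =====

-- The inner 'for key in check: check[key] += 1' keeps the key set and adds 1 to every stored value.
theorem inc_keys (c : PySem.Dict Int Int) :
    (c.keys.foldl (fun d k => d.modify k 0 (· + 1)) c).keys = c.keys := by
  have e : (c.keys.foldl (fun d k => d.modify k 0 (· + 1)) c).keys
      = PySem.Set.update c.keys c.keys :=
    PySem.Dict.keys_foldl_modify c.keys 0 (fun _ _ v => v + 1) c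
  rw [e, PySem.Set.update_eq_append_filter]
  have hf : (PySem.Set.ofList c.keys).filter (fun y => !PySem.Set.contains c.keys y) = [] := by
    apply List.filter_eq_nil_iff.mpr
    intro y hy
    have : y ∈ c.keys := (PySem.Set.mem_ofList c.keys y).mp hy
    simp [this]
  rw [hf, List.append_nil]

theorem main_loop (t : List Int) : ∀ (n : Int) (acc : List Int)
    (l check : PySem.Dict Int Int),
    l.keys.Nodup →
    check.keys = l.keys →
    (∀ v, check.get? v = (l.get? v).map (fun j => n - 1 - j)) →
    (t.foldl solAStep (acc, check)).1
      = ((PySem.List.enumerate t n).foldl solBStep (acc, l)).1 := by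
  induction t with
  | nil => intro n acc l check _ _ _; simp [PySem.List.enumerate]
  | cons v t ih =>
    intro n acc l check hnd hk hg
    rw [PySem.List.enumerate_cons]
    simp only [List.foldl_cons]
    have hndc : check.keys.Nodup := hk ▸ hnd
    set check1 := check.keys.foldl (fun d k => d.modify k 0 (· + 1)) check with hc1
    have hk1 : check1.keys = l.keys := by rw [hc1, inc_keys check, hk]
    have hg1 : ∀ w, check1.get? w = (l.get? w).map (fun j => n - j) := by
      intro w
      cases hw : l.get? w with
      | none =>
        have hcw : check.get? w = none := by rw [hg w, hw]; rfl
        have hmem : w ∉ l.keys := hk ▸ (PySem.Dict.get?_eq_none_iff_not_mem_keys check w).mp hcw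
        rw [(PySem.Dict.get?_eq_none_iff_not_mem_keys check1 w).mpr (hk1 ▸ hmem)]
        rfl
      | some j =>
        have hcw : check.get? w = some (n - 1 - j) := by rw [hg w, hw]; rfl
        have hged : check.getD w 0 = n - 1 - j := PySem.Dict.getD_of_get?_eq_some check 0 hcw
        have hmem : w ∈ check.keys := by
          have : check.contains w = true := by
            rw [PySem.Dict.contains_eq_isSome_get?, hcw]; rfl
          exact (PySem.Dict.contains_iff_mem_keys check w).mp this
        have hcount : List.count w check.keys = 1 := List.count_eq_one_of_mem hndc hmem
        have hgd1 : check1.getD w 0 = n - j := by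
          have e : check1.getD w 0 = check.getD w 0 + (List.count w check.keys : Int) :=
            PySem.Dict.getD_foldl_modify_add_one check.keys check w
          rw [e, hged, hcount]; push_cast; ring
        have hmem1 : w ∈ check1.keys := by rw [hk1, ← hk]; exact hmem
        have hc1w : check1.contains w = true := (PySem.Dict.contains_iff_mem_keys check1 w).mpr hmem1
        rw [PySem.Dict.contains_eq_isSome_get?] at hc1w
        cases hq : check1.get? w with
        | none => rw [hq] at hc1w; simp at hc1w
        | some u =>
          have hu : check1.getD w 0 = u := PySem.Dict.getD_of_get?_eq_some check1 0 hq
          rw [hgd1] at hu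
          simp only [Option.map_some]
          rw [← hu]
    have hinv : ∀ w, (check1.insert v 0).get? w
        = ((l.insert v n).get? w).map (fun j => (n + 1) - 1 - j) := by
      intro w
      rw [PySem.Dict.get?_insert, PySem.Dict.get?_insert]
      split
      · simp only [Option.map_some]
        congr 1
        ring
      · rw [hg1 w]
        cases l.get? w with
        | none => rfl
        | some j => simp only [Option.map_some]; congr 1; ring
    cases hv : l.get? v with
    | none =>
      have h1 : check1.get? v = none := by rw [hg1 v, hv]; rfl
      have hcB : l.contains v = false := by rw [PySem.Dict.contains_eq_isSome_get?, hv]; rfl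
      have hcA : check1.contains v = false := by rw [PySem.Dict.contains_eq_isSome_get?, h1]; rfl
      have eA : solAStep (acc, check) v = (acc ++ [-1], check1.insert v 0) := by
        show (match check1.get? v with
          | none => (acc ++ [-1], check1.insert v 0)
          | some x => (acc ++ [x], check1.insert v 0)) = _
        rw [h1]
      have eB : solBStep (acc, l) (n, v) = (acc ++ [-1], l.insert v n) := by
        simp only [solBStep, hcB]
        simp
      rw [eA, eB]
      apply ih (n + 1) (acc ++ [-1]) (l.insert v n) (check1.insert v 0)
        (PySem.Dict.nodup_keys_insert _ _ _ hnd)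
      · rw [PySem.Dict.keys_insert_of_not_contains _ _ hcA,
            PySem.Dict.keys_insert_of_not_contains _ _ hcB, hk1]
      · exact hinv
    | some j =>
      have h1 : check1.get? v = some (n - j) := by rw [hg1 v, hv]; rfl
      have hcB : l.contains v = true := by rw [PySem.Dict.contains_eq_isSome_get?, hv]; rfl
      have hcA : check1.contains v = true := by rw [PySem.Dict.contains_eq_isSome_get?, h1]; rfl
      have eA : solAStep (acc, check) v = (acc ++ [n - j], check1.insert v 0) := by
        show (match check1.get? v with
          | none => (acc ++ [-1], check1.insert v 0)
          | some x => (acc ++ [x], check1.insert v 0)) = _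
        rw [h1]
      have eB : solBStep (acc, l) (n, v) = (acc ++ [n - j], l.insert v n) := by
        simp only [solBStep, hcB]
        rw [PySem.Dict.getD_of_get?_eq_some l 0 hv]
        simp
      rw [eA, eB]
      apply ih (n + 1) (acc ++ [n - j]) (l.insert v n) (check1.insert v 0)
        (PySem.Dict.nodup_keys_insert _ _ _ hnd)
      · rw [PySem.Dict.keys_insert_of_contains _ _ hcB,
            PySem.Dict.keys_insert_of_contains _ _ hcA, hk1]
      · exact hinv

theorem solution_spec : Claim_equal_solution := by
  intro s _
  unfold Spec_solution solution solution_alt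
  exact main_loop s 0 [] PySem.Dict.empty PySem.Dict.empty (by simp)
    (by simp) (by intro v; simp)
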